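-- pv_equiv track=rewrite | github.com/DenysOliinyk3007/nanoPhos-figures | PeptideCollapse.py | _calculate_phospho_positions
-- ===== SOURCE A (Python) =====
-- from typing import Dict, List, Optional, Tuple, Union
--
-- def _calculate_phospho_positions(phospho_sequence: str) -> List[int]:
--
--     if "[Phospho (STY)]" not in phospho_sequence:
--         return []
--
--     segments = phospho_sequence.split("[Phospho (STY)]")
--     positions = []
--     current_pos = 0
--
--     for i in range(len(segments) - 1):
--         current_pos += len(segments[i])
--         positions.append(current_pos)
--     return positions
-- ===== SOURCE B (Python) =====
-- def _calculate_phospho_positions(phospho_sequence):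
--     marker = "[Phospho (STY)]"
--     positions = []
--     base = 0
--     rest = phospho_sequence
--     while True:
--         idx = rest.find(marker)
--         if idx == -1:
--             return positions
--         base += idx
--         positions.append(base)
--         rest = rest[idx + len(marker):]
-- ===== Notes on version B (the rewrite author's own statement) =====
-- stated objective: alternative
-- what changed: Replaces the split-into-segments pass plus an index loop summing segment lengths with a single repeated str.find scan that slices past each match and accumulates the running residue offset directly.
import Mathlib
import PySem

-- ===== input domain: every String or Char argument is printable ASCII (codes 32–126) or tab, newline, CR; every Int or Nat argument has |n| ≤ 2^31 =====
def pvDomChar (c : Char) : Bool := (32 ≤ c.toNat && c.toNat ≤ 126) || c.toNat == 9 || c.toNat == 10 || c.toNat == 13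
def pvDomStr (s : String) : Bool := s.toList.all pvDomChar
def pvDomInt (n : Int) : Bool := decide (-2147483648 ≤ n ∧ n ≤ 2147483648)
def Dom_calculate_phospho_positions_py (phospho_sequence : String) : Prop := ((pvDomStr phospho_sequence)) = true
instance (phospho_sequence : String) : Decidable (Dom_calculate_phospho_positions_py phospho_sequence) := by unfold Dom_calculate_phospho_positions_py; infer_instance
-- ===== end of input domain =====

-- B replaces split-then-sum-segment-lengths with a repeated find-and-slice scan; return values proved equal on all of Dom (alternative decomposition, same cost).


-- ===== PORT A =====
-- 'segments[i]' is always in range (0 ≤ i < len(segments)), so pyGetD's default "" is never used.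
def calculate_phospho_positions_py (phospho_sequence : String) : List Int :=
  if PySem.Str.isIn "[Phospho (STY)]" phospho_sequence = false then []
  else
    let segments := (PySem.Str.split? phospho_sequence "[Phospho (STY)]").getD []  -- separator ≠ "", so split? is always `some`
    ((PySem.List.pyRange 0 ((segments.length : Int) - 1) 1).foldl
      (fun (st : List Int × Int) i =>
        let current_pos := st.2 + PySem.Str.len (PySem.List.pyGetD segments i "")
        (st.1 ++ [current_pos], current_pos))
      (([] : List Int), (0 : Int))).1

-- ===== PORT B =====
-- The marker string, as its character list (B works on the char-list model of the Python str).
def pvMarker : List Char := "[Phospho (STY)]".toList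

-- the 'while True' loop of B: rest.find(marker); stop on -1, else record base+idx and slice past the match
def pvAltLoop (positions : List Int) (base : Int) (rest : List Char) : List Int :=
  let idx := PySem.Chars.find rest pvMarker
  if idx = -1 then positions
  else pvAltLoop (positions ++ [base + idx]) (base + idx)
         (PySem.List.slice rest (some (idx + (pvMarker.length : Int))) none)
termination_by rest.length
decreasing_by
  rename_i h
  have h0 : (0:Int) ≤ PySem.Chars.find rest pvMarker := by
    have := PySem.Chars.neg_one_le_find rest pvMarker
    omega
  have hinf : pvMarker <:+: rest := by
    have := (PySem.Chars.find_ne_neg_one_iff rest pvMarker).mp (by simpa using h)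
    exact this
  have hlen : pvMarker.length ≤ rest.length := hinf.length_le
  have hM : pvMarker.length = 15 := by decide
  rw [PySem.List.slice_from rest (a := PySem.Chars.find rest pvMarker + (pvMarker.length : Int)) (by omega)]
  simp only [List.length_drop]
  omega

def calculate_phospho_positions_py_alt (phospho_sequence : String) : List Int :=
  pvAltLoop [] 0 phospho_sequence.toList

-- ===== PRECONDITION & SPEC =====
def Spec_calculate_phospho_positions_py (phospho_sequence : String) (out : List Int) : Prop := out = calculate_phospho_positions_py_alt phospho_sequence
instance (phospho_sequence : String) (out : List Int) : Decidable (Spec_calculate_phospho_positions_py phospho_sequence out) := by unfold Spec_calculate_phospho_positions_py; infer_instance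

-- ===== CLAIM (what is proved, stated in full; the proofs are below) =====
def Claim_equal_calculate_phospho_positions_py : Prop := ∀ (phospho_sequence : String), Dom_calculate_phospho_positions_py phospho_sequence → Spec_calculate_phospho_positions_py phospho_sequence (calculate_phospho_positions_py phospho_sequence)

-- ===== LEMMAS AND PROOFS =====

-- structural model of PySem.Chars.splitOn.go for the fixed non-empty separator pvMarker
def pvSplit (l cur : List Char) : List (List Char) :=
  match l with
  | [] => [cur.reverse]
  | c :: rest =>
    if pvMarker.isPrefixOf (c :: rest) then
      cur.reverse :: pvSplit ((c :: rest).drop pvMarker.length) []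
    else pvSplit rest (c :: cur)
termination_by l.length
decreasing_by
  · simp only [List.length_drop]
    have hM : pvMarker.length = 15 := by decide
    simp only [List.length_cons]
    omega
  · simp

-- running prefix sums of the segment lengths
def pvSums (l : List (List Char)) (b : Int) : List Int :=
  match l with
  | [] => []
  | x :: rest => (b + (x.length : Int)) :: pvSums rest (b + (x.length : Int))

lemma pvSplit_ne_nil (l cur : List Char) : pvSplit l cur ≠ [] := by
  fun_induction pvSplit l cur <;> simp_all

lemma go_spec (fuel : Nat) (l cur : List Char) (acc : List (List Char))
    (h : l.length < fuel) :
    PySem.Chars.splitOn.go pvMarker fuel l cur acc = acc.reverse ++ pvSplit l cur := by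
  induction fuel generalizing l cur acc with
  | zero => omega
  | succ f ih =>
    cases l with
    | nil => simp [PySem.Chars.splitOn.go, pvSplit]
    | cons c rest =>
      rw [PySem.Chars.splitOn.go, pvSplit]
      by_cases hp : pvMarker.isPrefixOf (c :: rest)
      · simp only [hp, if_true]
        rw [ih _ _ _ (by
          have hM : pvMarker.length = 15 := by decide
          simp only [List.length_drop, List.length_cons] at *
          omega)]
        simp
      · simp only [hp, if_false, Bool.false_eq_true]
        rw [ih _ _ _ (by simp at h ⊢; omega)]

lemma splitOn_eq_pvSplit (t : List Char) :
    PySem.Chars.splitOn t pvMarker = pvSplit t [] := by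
  rw [PySem.Chars.splitOn, go_spec _ _ _ _ (by omega)]
  simp

lemma pvSplit_of_not_infix : ∀ (t cur : List Char), ¬ pvMarker <:+: t →
    pvSplit t cur = [cur.reverse ++ t] := by
  intro t
  induction t with
  | nil => intro cur h; simp [pvSplit]
  | cons c rest ih =>
    intro cur h
    have hp : pvMarker.isPrefixOf (c :: rest) = false := by
      by_contra hx
      exact h (List.IsPrefix.isInfix (List.isPrefixOf_iff_prefix.mp (by simpa using hx)))
    rw [pvSplit]
    simp only [hp, Bool.false_eq_true, if_false]
    rw [ih (c :: cur) (fun hi => h (List.infix_cons hi))]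
    simp

lemma pvSplit_of_first : ∀ (i : Nat) (t cur : List Char),
    pvMarker <+: t.drop i → (∀ j < i, ¬ pvMarker <+: t.drop j) →
    pvSplit t cur = (cur.reverse ++ t.take i) :: pvSplit (t.drop (i + pvMarker.length)) [] := by
  intro i
  induction i with
  | zero =>
    intro t cur h1 _
    cases t with
    | nil =>
      exfalso
      have : pvMarker = [] := List.prefix_nil.mp (by simpa using h1)
      simp [pvMarker] at this
    | cons c rest =>
      have hp : pvMarker.isPrefixOf (c :: rest) = true :=
        List.isPrefixOf_iff_prefix.mpr (by simpa using h1)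
      rw [pvSplit]
      simp [hp]
  | succ i ih =>
    intro t cur h1 h2
    cases t with
    | nil =>
      exfalso
      have : pvMarker = [] := List.prefix_nil.mp (by simpa using h1)
      simp [pvMarker] at this
    | cons c rest =>
      have hp : pvMarker.isPrefixOf (c :: rest) = false := by
        by_contra hx
        exact h2 0 (Nat.succ_pos i)
          (by simpa using List.isPrefixOf_iff_prefix.mp (by simpa using hx))
      rw [pvSplit]
      simp only [hp, Bool.false_eq_true, if_false]
      rw [ih rest (c :: cur) (by simpa using h1)
          (fun j hj => by simpa using h2 (j + 1) (by omega))]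
      have hd : (c :: rest).drop (i + 1 + pvMarker.length) = rest.drop (i + pvMarker.length) := by
        rw [show i + 1 + pvMarker.length = (i + pvMarker.length) + 1 from by omega]
        simp [List.drop_succ_cons]
      simp [List.take_succ_cons, hd]

lemma pvAltLoop_eq (positions : List Int) (base : Int) (t : List Char) :
    pvAltLoop positions base t = positions ++ pvSums (pvSplit t []).dropLast base := by
  fun_induction pvAltLoop positions base t with
  | case1 positions base rest idx hidx =>
    have hni : ¬ pvMarker <:+: rest := (PySem.Chars.find_eq_neg_one_iff _ _).mp (by simpa using hidx : PySem.Chars.find rest pvMarker = -1)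
    rw [pvSplit_of_not_infix rest [] hni]
    simp [pvSums]
  | case2 positions base rest idx hidx ih =>
    have hidxeq : idx = PySem.Chars.find rest pvMarker := rfl
    simp only [hidxeq] at hidx ih ⊢
    have h0 : (0:Int) ≤ PySem.Chars.find rest pvMarker := by
      have h := PySem.Chars.neg_one_le_find rest pvMarker
      omega
    obtain ⟨hpre, hmin⟩ := PySem.Chars.find_spec h0
    have hle : (PySem.Chars.find rest pvMarker).toNat ≤ rest.length := by
      have := PySem.Chars.find_le_length rest pvMarker
      omega
    have hslice : PySem.List.slice rest (some (PySem.Chars.find rest pvMarker + (pvMarker.length : Int)))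
        = rest.drop ((PySem.Chars.find rest pvMarker).toNat + pvMarker.length) := by
      rw [PySem.List.slice_from rest
          (a := PySem.Chars.find rest pvMarker + (pvMarker.length : Int)) (by omega)]
      congr 1
      omega
    rw [hslice] at ih ⊢
    rw [pvSplit_of_first (PySem.Chars.find rest pvMarker).toNat rest [] hpre hmin]
    rw [List.dropLast_cons_of_ne_nil (pvSplit_ne_nil _ _)]
    rw [pvSums, ih]
    have htk : ((rest.take (PySem.Chars.find rest pvMarker).toNat).length : Int)
        = PySem.Chars.find rest pvMarker := by
      simp only [List.length_take]
      omega
    simp only [List.reverse_nil, List.nil_append, htk]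
    simp [List.append_assoc]

lemma foldl_sums (l : List String) (init : List Int) (b : Int) :
    (l.foldl
      (fun (st : List Int × Int) x =>
        (st.1 ++ [st.2 + PySem.Str.len x], st.2 + PySem.Str.len x)) (init, b)).1 = init ++ pvSums (l.map String.toList) b := by
  induction l generalizing init b with
  | nil => simp [pvSums]
  | cons x rest ih =>
    simp only [List.foldl_cons, List.map_cons, pvSums]
    rw [ih]
    simp [PySem.Str.len_eq]

lemma foldA (segs : List String) (hne : segs ≠ []) :
    ((PySem.List.pyRange 0 ((segs.length : Int) - 1) 1).foldl
      (fun (st : List Int × Int) i =>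
        let current_pos := st.2 + PySem.Str.len (PySem.List.pyGetD segs i "")
        (st.1 ++ [current_pos], current_pos))
      (([] : List Int), (0 : Int))).1 = pvSums (segs.dropLast.map String.toList) 0 := by
  show ((PySem.List.pyRange 0 ((segs.length : Int) - 1) 1).foldl
      (fun (st : List Int × Int) i =>
        (st.1 ++ [st.2 + PySem.Str.len (PySem.List.pyGetD segs i "")],
         st.2 + PySem.Str.len (PySem.List.pyGetD segs i "")))
      (([] : List Int), (0 : Int))).1 = _
  have hlen : 1 ≤ segs.length := by
    cases segs with
    | nil => exact absurd rfl hne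
    | cons a l => simp
  have hcong := PySem.List.foldl_congr_mem
    (PySem.List.pyRange 0 ((segs.length : Int) - 1) 1)
    (fun (st : List Int × Int) i =>
        (st.1 ++ [st.2 + PySem.Str.len (PySem.List.pyGetD segs i "")],
         st.2 + PySem.Str.len (PySem.List.pyGetD segs i "")))
    (fun (st : List Int × Int) i =>
        (st.1 ++ [st.2 + PySem.Str.len (PySem.List.pyGetD segs.dropLast i "")],
         st.2 + PySem.Str.len (PySem.List.pyGetD segs.dropLast i "")))
    (([] : List Int), (0 : Int))
    (by
      intro acc j hj
      have hj' := (PySem.List.mem_pyRange_iff_of_pos (by omega) j).mp hj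
      have h0j : 0 ≤ j := hj'.1
      have hjlt : j < (segs.length : Int) - 1 := hj'.2.1
      have hgd : PySem.List.pyGetD segs j "" = PySem.List.pyGetD segs.dropLast j "" := by
        rw [show j = ((j.toNat : Nat) : Int) from (Int.toNat_of_nonneg h0j).symm]
        rw [PySem.List.pyGetD_natCast, PySem.List.pyGetD_natCast]
        rw [List.getD_eq_getElem?_getD, List.getD_eq_getElem?_getD]
        rw [List.getElem?_dropLast, if_pos (by omega)]
      simp only [hgd])
  rw [hcong]
  have hb : (segs.length : Int) - 1 = ((segs.dropLast.length : Nat) : Int) := by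
    simp only [List.length_dropLast]
    omega
  rw [hb]
  have h2 := PySem.List.foldl_pyRange_pyGetD' segs.dropLast ""
    (fun (st : List Int × Int) x =>
        (st.1 ++ [st.2 + PySem.Str.len x], st.2 + PySem.Str.len x))
    ((([] : List Int), (0 : Int))) (a := 0) le_rfl
  rw [Int.toNat_zero, List.drop_zero] at h2
  rw [h2, foldl_sums]
  simp

-- ===== VERDICT (by name: the statement is the Claim_ definition above) =====
theorem calculate_phospho_positions_py_spec : Claim_equal_calculate_phospho_positions_py := by
  intro s _
  unfold Spec_calculate_phospho_positions_py calculate_phospho_positions_py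
    calculate_phospho_positions_py_alt
  rw [pvAltLoop_eq]
  by_cases hin : PySem.Str.isIn "[Phospho (STY)]" s = false
  · rw [if_pos hin]
    have hni : ¬ pvMarker <:+: s.toList := by
      intro hinf
      have ht := (PySem.Str.isIn_iff_infix "[Phospho (STY)]" s).mpr hinf
      rw [ht] at hin
      exact absurd hin (by simp)
    rw [pvSplit_of_not_infix s.toList [] hni]
    simp [pvSums]
  · rw [if_neg hin]
    have hseg : (PySem.Str.split? s "[Phospho (STY)]").getD []
        = (pvSplit s.toList []).map String.ofList := by
      simp [PySem.Str.split?, PySem.Chars.split?,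
        show "[Phospho (STY)]".toList = pvMarker from rfl, splitOn_eq_pvSplit,
        (by decide : ¬ (pvMarker = []))]
    simp only [hseg]
    have hne : (pvSplit s.toList []).map String.ofList ≠ [] := by
      simpa using pvSplit_ne_nil s.toList []
    rw [foldA _ hne]
    simp [← List.map_dropLast, List.map_map, Function.comp_def, String.toList_ofList]
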